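-- pv_equiv track=rewrite | github.com/MoreCookies/cardShuffleTrickb | cards3.py | find
-- ===== SOURCE A (Python) =====
-- def find(n):
--     cards = [i for i in range(n)]
--     solution = [None] * n
--     unknownIndexes = [j for j in range(n)]
--     tail = []
--     pushToBack = False
--     while len(cards) > 0:
--         for i in unknownIndexes:
--             if solution[i] is None:
--                 if not pushToBack:
--                     solution[i] = cards[0]
--                     del(cards[0])
--                     pushToBack = True
--                 else:
--                     tail.append(i)
--                     pushToBack = False
--         unknownIndexes = tail
--         tail = []
--     return solution
-- ===== SOURCE B (Python) =====
-- def find(n):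
--     solution = [None] * n
--     queue = list(range(n))   # positions still waiting for a card, in deal order
--     head = 0                 # queue front pointer (amortized O(1) 'popleft')
--     card = 0
--     deal = True
--     while head < len(queue):
--         i = queue[head]
--         head += 1
--         if deal:
--             solution[i] = card
--             card += 1
--         else:
--             queue.append(i)
--         deal = not deal
--     return solution
-- ===== Notes on version B (the rewrite author's own statement) =====
-- stated objective: faster
-- what changed: Replaces A's nested pass structure (outer while over a rebuilt tail list, inner for pass, card list with repeated del cards[0]) by a single flat queue loop over positions with an integer card counter and a deal/skip flag carried through the queue.
import Mathlib
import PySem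

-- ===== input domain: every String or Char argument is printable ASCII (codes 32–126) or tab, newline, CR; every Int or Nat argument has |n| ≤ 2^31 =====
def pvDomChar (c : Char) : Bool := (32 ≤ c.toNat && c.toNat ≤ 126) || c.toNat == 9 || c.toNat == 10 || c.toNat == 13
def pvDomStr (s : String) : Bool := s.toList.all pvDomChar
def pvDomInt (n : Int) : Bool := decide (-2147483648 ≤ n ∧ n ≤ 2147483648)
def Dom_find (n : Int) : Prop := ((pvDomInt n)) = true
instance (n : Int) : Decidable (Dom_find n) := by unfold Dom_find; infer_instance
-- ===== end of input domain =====

-- B replaces A's nested pass structure (outer while rebuilding a tail list, card list with del cards[0])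
-- by a single flat queue loop with an integer card counter (objective: faster, measured).


-- ===== PORT A =====
-- the inner 'for i in unknownIndexes' pass: returns (solution, cards, pushToBack, tail)
def findPass (idxs : List Int) (sol : List (Option Int)) (cards : List Int) (push : Bool) :
    List (Option Int) × List Int × Bool × List Int :=
  match idxs with
  | [] => (sol, cards, push, [])
  | i :: rest =>
    if PySem.List.pyGet? sol i = some none then          -- if solution[i] is None
      if push = false then
        -- solution[i] = cards[0]; del cards[0]  (cards is provably nonempty here on every
        -- reachable state; pyGet?/drop totalize the IndexError branch)
        findPass rest (PySem.List.pySetD sol i (PySem.List.pyGet? cards 0)) (cards.drop 1) true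
      else
        -- tail.append(i): the tail list is built head-first by the recursion, same order
        let r := findPass rest sol cards false
        (r.1, r.2.1, r.2.2.1, i :: r.2.2.2)
    else
      findPass rest sol cards push

-- termination measure of A's outer while loop (also reused by the equivalence proof)
theorem findPass_measure (idxs : List Int) (sol : List (Option Int)) (cards : List Int)
    (push : Bool) (h : idxs ≠ []) :
    2 * (findPass idxs sol cards push).2.2.2.length +
      (if (findPass idxs sol cards push).2.2.1 then 1 else 0) <
    2 * idxs.length + (if push then 1 else 0) := by
  induction idxs generalizing sol cards push with
  | nil => exact absurd rfl h
  | cons i rest ih =>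
    simp only [findPass]
    by_cases h1 : PySem.List.pyGet? sol i = some none
    · cases push
      · -- deal branch
        simp only [h1, if_true]
        rcases eq_or_ne rest [] with hr | hr
        · subst hr; simp [findPass]
        · have h2 := ih (PySem.List.pySetD sol i (PySem.List.pyGet? cards 0)) (cards.drop 1) true hr
          cases hb : (findPass rest (PySem.List.pySetD sol i (PySem.List.pyGet? cards 0)) (cards.drop 1) true).2.2.1 <;>
            simp [*] at h2 ⊢ <;> omega
      · -- skip branch
        simp only [h1, if_true, if_neg (by simp : ¬ (true = false))]
        rcases eq_or_ne rest [] with hr | hr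
        · subst hr; simp [findPass]
        · have h2 := ih sol cards false hr
          cases hb : (findPass rest sol cards false).2.2.1 <;> simp [hb] at h2 ⊢ <;> omega
    · -- entry already solved (unreachable on actual states)
      simp only [h1, if_false]
      rcases eq_or_ne rest [] with hr | hr
      · subst hr; simp [findPass]; cases push <;> simp
      · have h2 := ih sol cards push hr
        cases hb : (findPass rest sol cards push).2.2.1 <;> cases push <;> simp [hb] at h2 ⊢ <;> omega

-- the outer 'while len(cards) > 0' loop
def findLoop (unknown : List Int) (sol : List (Option Int)) (cards : List Int) (push : Bool) :
    List (Option Int) :=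
  if cards.length = 0 then sol
  else if hu : unknown = [] then sol
    -- totalization guard: with cards nonempty and no pending indexes Python's loop never
    -- terminates; this state is unreachable from find's actual inputs
  else
    let r := findPass unknown sol cards push
    findLoop r.2.2.2 r.1 r.2.1 r.2.2.1
termination_by 2 * unknown.length + (if push then 1 else 0)
decreasing_by exact findPass_measure unknown sol cards push hu

def find (n : Int) : List (Option Int) :=
  findLoop (PySem.List.pyRange 0 n 1) (List.replicate n.toNat none) (PySem.List.pyRange 0 n 1) false

-- ===== PORT B =====
-- single queue loop: queue of positions with front pointer 'head', card counter, deal flag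
def findAltLoop (queue : List Int) (head : Nat) (sol : List (Option Int)) (card : Int)
    (deal : Bool) : List (Option Int) :=
  if h : head < queue.length then
    let i := queue[head]
    if deal then
      findAltLoop queue (head + 1) (PySem.List.pySetD sol i (some card)) (card + 1) false
    else
      findAltLoop (queue ++ [i]) (head + 1) sol card true
  else sol
termination_by 2 * (queue.length - head) + (if deal then 0 else 1)
decreasing_by
  all_goals simp [*, List.length_append] <;> omega

def find_alt (n : Int) : List (Option Int) :=
  findAltLoop (PySem.List.pyRange 0 n 1) 0 (List.replicate n.toNat none) 0 true

-- ===== PRECONDITION & SPEC =====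
def Spec_find (n : Int) (out : List (Option Int)) : Prop := out = find_alt n
instance (n : Int) (out : List (Option Int)) : Decidable (Spec_find n out) := by unfold Spec_find; infer_instance

-- ===== CLAIM (what is proved, stated in full; the proofs are below) =====
def Claim_equal_find : Prop := ∀ (n : Int), Dom_find n → Spec_find n (find n)

-- ===== LEMMAS AND PROOFS =====

-- B's queue loop with the consumed prefix dropped (pure cons/append form of findAltLoop)
def bq (q : List Int) (sol : List (Option Int)) (card : Int) (deal : Bool) : List (Option Int) :=
  match q with
  | [] => sol
  | i :: rest =>
    if deal then bq rest (PySem.List.pySetD sol i (some card)) (card + 1) false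
    else bq (rest ++ [i]) sol card true
termination_by 2 * q.length + (if deal then 0 else 1)
decreasing_by
  all_goals simp [*, List.length_append] <;> omega

theorem bq_nil (sol : List (Option Int)) (card : Int) (deal : Bool) :
    bq [] sol card deal = sol := by rw [bq]

theorem bq_cons_true (i : Int) (rest : List Int) (sol : List (Option Int)) (card : Int) :
    bq (i :: rest) sol card true
      = bq rest (PySem.List.pySetD sol i (some card)) (card + 1) false := by
  rw [bq, if_pos rfl]

theorem bq_cons_false (i : Int) (rest : List Int) (sol : List (Option Int)) (card : Int) :
    bq (i :: rest) sol card false = bq (rest ++ [i]) sol card true := by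
  rw [bq, if_neg (by simp)]

theorem findAltLoop_eq_bq (q : List Int) (head : Nat) (sol : List (Option Int)) (card : Int)
    (deal : Bool) (hh : head ≤ q.length) :
    findAltLoop q head sol card deal = bq (q.drop head) sol card deal := by
  suffices H : ∀ k (q : List Int) (head : Nat) sol card deal,
      2 * (q.length - head) + (if deal then 0 else 1) ≤ k → head ≤ q.length →
      findAltLoop q head sol card deal = bq (q.drop head) sol card deal by
    exact H _ q head sol card deal le_rfl hh
  intro k
  induction k with
  | zero =>
    intro q head sol card deal hk hh
    have h1 : ¬ head < q.length := by cases deal <;> simp at hk <;> omega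
    rw [findAltLoop, dif_neg h1, List.drop_eq_nil_of_le (by omega), bq_nil]
  | succ k ih =>
    intro q head sol card deal hk hh
    by_cases h1 : head < q.length
    · rw [findAltLoop, dif_pos h1, List.drop_eq_getElem_cons h1]
      cases deal
      · rw [if_neg (by simp)]
        rw [ih (q ++ [q[head]]) (head + 1) sol card true
              (by simp [List.length_append] at hk ⊢; omega) (by simp; omega),
            List.drop_append_of_le_length (by omega), bq_cons_false]
      · rw [if_pos rfl]
        rw [ih q (head + 1) (PySem.List.pySetD sol q[head] (some card)) (card + 1) false
              (by simp at hk ⊢; omega) (by omega), bq_cons_true]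
    · rw [findAltLoop, dif_neg h1, List.drop_eq_nil_of_le (by omega), bq_nil]

theorem getElem?_pySetD_ne (sol : List (Option Int)) (i j : Int) (v : Option Int)
    (hi : 0 ≤ i) (hj : 0 ≤ j) (hne : j ≠ i) :
    (PySem.List.pySetD sol i v)[j.toNat]? = sol[j.toNat]? := by
  rw [PySem.List.pySetD_of_nonneg sol v hi]
  exact List.getElem?_set_ne (by omega)

theorem findPass_nil (sol : List (Option Int)) (cards : List Int) (push : Bool) :
    findPass [] sol cards push = (sol, cards, push, []) := rfl

theorem findPass_cons_deal (i : Int) (rest : List Int) (sol : List (Option Int))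
    (cards : List Int) (h : PySem.List.pyGet? sol i = some none) :
    findPass (i :: rest) sol cards false
      = findPass rest (PySem.List.pySetD sol i (PySem.List.pyGet? cards 0)) (cards.drop 1) true := by
  simp [findPass, h]

theorem findPass_cons_skip (i : Int) (rest : List Int) (sol : List (Option Int))
    (cards : List Int) (h : PySem.List.pyGet? sol i = some none) :
    findPass (i :: rest) sol cards true
      = ((findPass rest sol cards false).1, (findPass rest sol cards false).2.1,
         (findPass rest sol cards false).2.2.1, i :: (findPass rest sol cards false).2.2.2) := by
  simp [findPass, h]

-- characterization of one pass of A on cards = pyRange c n 1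
theorem findPass_spec (front : List Int) (sol : List (Option Int)) (c n : Int) (push : Bool)
    (hel : ∀ i ∈ front, 0 ≤ i ∧ i < (sol.length : Int) ∧ sol[i.toNat]? = some none)
    (hnd : front.Nodup) (hlen : (front.length : Int) ≤ n - c) :
    ∃ d : Nat, d ≤ front.length ∧
      (findPass front sol (PySem.List.pyRange c n 1) push).2.1
        = PySem.List.pyRange (c + d) n 1 ∧
      (findPass front sol (PySem.List.pyRange c n 1) push).2.2.2.length + d = front.length ∧
      (findPass front sol (PySem.List.pyRange c n 1) push).1.length = sol.length ∧
      (findPass front sol (PySem.List.pyRange c n 1) push).2.2.2.Sublist front ∧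
      (∀ j ∈ (findPass front sol (PySem.List.pyRange c n 1) push).2.2.2,
        (findPass front sol (PySem.List.pyRange c n 1) push).1[j.toNat]? = some none) ∧
      (∀ j : Int, 0 ≤ j → j ∉ front →
        (findPass front sol (PySem.List.pyRange c n 1) push).1[j.toNat]? = sol[j.toNat]?) := by
  induction front generalizing sol c push with
  | nil =>
    refine ⟨0, by simp, ?_, by simp [findPass_nil], by simp [findPass_nil],
      by simp [findPass_nil], by simp [findPass_nil], by simp [findPass_nil]⟩
    simp [findPass_nil]
  | cons i rest ih =>
    obtain ⟨hi0, hilen, hinone⟩ := hel i (by simp)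
    have hget : PySem.List.pyGet? sol i = some none := by
      rw [PySem.List.pyGet?_of_nonneg sol hi0]; exact hinone
    obtain ⟨hni, hndr⟩ := List.nodup_cons.mp hnd
    have hcn : c < n := by simp only [List.length_cons] at hlen; push_cast at hlen; omega
    cases push with
    | false =>
      rw [findPass_cons_deal i rest sol _ hget, PySem.List.pyRange_one_cons hcn]
      simp only [PySem.List.pyGet?_zero_cons, List.drop_succ_cons, List.drop_zero]
      have hel' : ∀ j ∈ rest, 0 ≤ j ∧ j < ((PySem.List.pySetD sol i (some c)).length : Int) ∧
          (PySem.List.pySetD sol i (some c))[j.toNat]? = some none := by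
        intro j hj
        obtain ⟨hj0, hjlen, hjnone⟩ := hel j (by simp [hj])
        refine ⟨hj0, ?_, ?_⟩
        · rw [PySem.List.length_pySetD]; exact hjlen
        · rw [getElem?_pySetD_ne sol i j (some c) hi0 hj0 (by rintro rfl; exact hni hj)]
          exact hjnone
      obtain ⟨d, hd1, hd2, hd3, hd4, hd5, hd6, hd7⟩ :=
        ih (PySem.List.pySetD sol i (some c)) (c + 1) true hel' hndr
          (by simp only [List.length_cons] at hlen; push_cast at hlen ⊢; omega)
      refine ⟨d + 1, by simp; omega, ?_, ?_, ?_, hd5.trans (List.sublist_cons_self i rest),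
        hd6, ?_⟩
      · rw [hd2]; congr 1; push_cast; ring
      · simp only [List.length_cons]; omega
      · rw [hd4, PySem.List.length_pySetD]
      · intro j hj0 hj
        rw [hd7 j hj0 (fun h => hj (List.mem_cons_of_mem i h)),
          getElem?_pySetD_ne sol i j (some c) hi0 hj0
            (by rintro rfl; exact hj (List.mem_cons_self))]
    | true =>
      rw [findPass_cons_skip i rest sol _ hget]
      obtain ⟨d, hd1, hd2, hd3, hd4, hd5, hd6, hd7⟩ :=
        ih sol c false (fun j hj => hel j (by simp [hj])) hndr
          (by simp only [List.length_cons] at hlen; push_cast at hlen ⊢; omega)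
      refine ⟨d, by simpa using Nat.le_succ_of_le hd1, hd2, ?_, hd4, hd5.cons₂ i, ?_, ?_⟩
      · simp only [List.length_cons]; omega
      · intro j hj
        rcases List.mem_cons.mp hj with rfl | hj
        · rw [hd7 j hi0 hni]; exact hinone
        · exact hd6 j hj
      · intro j hj0 hj
        exact hd7 j hj0 (fun h => hj (List.mem_cons_of_mem i h))

-- B's queue loop consumes A's passes one prefix at a time
theorem bq_pass (front back : List Int) (sol : List (Option Int)) (c n : Int) (deal : Bool)
    (hel : ∀ i ∈ front, 0 ≤ i ∧ i < (sol.length : Int) ∧ sol[i.toNat]? = some none)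
    (hnd : front.Nodup) (hlen : (front.length : Int) ≤ n - c) :
    bq (front ++ back) sol c deal =
      bq (back ++ (findPass front sol (PySem.List.pyRange c n 1) (!deal)).2.2.2)
         (findPass front sol (PySem.List.pyRange c n 1) (!deal)).1
         (n - ((findPass front sol (PySem.List.pyRange c n 1) (!deal)).2.1.length : Int))
         (!(findPass front sol (PySem.List.pyRange c n 1) (!deal)).2.2.1) := by
  induction front generalizing back sol c deal with
  | nil =>
    have hcn : c ≤ n := by simp at hlen; omega
    rw [findPass_nil]
    simp only [List.nil_append, List.append_nil, Bool.not_not,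
      PySem.List.length_pyRange_one]
    rw [Int.toNat_of_nonneg (by omega)]
    simp
  | cons i rest ih =>
    obtain ⟨hi0, hilen, hinone⟩ := hel i (by simp)
    have hget : PySem.List.pyGet? sol i = some none := by
      rw [PySem.List.pyGet?_of_nonneg sol hi0]; exact hinone
    obtain ⟨hni, hndr⟩ := List.nodup_cons.mp hnd
    have hcn : c < n := by simp only [List.length_cons] at hlen; push_cast at hlen; omega
    have hel' : ∀ j ∈ rest, 0 ≤ j ∧ j < (sol.length : Int) ∧ sol[j.toNat]? = some none :=
      fun j hj => hel j (by simp [hj])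
    cases deal with
    | true =>
      rw [show (!true) = false from rfl, findPass_cons_deal i rest sol _ hget,
        PySem.List.pyRange_one_cons hcn]
      simp only [PySem.List.pyGet?_zero_cons, List.drop_succ_cons, List.drop_zero,
        List.cons_append]
      rw [bq_cons_true]
      have hel2 : ∀ j ∈ rest, 0 ≤ j ∧ j < ((PySem.List.pySetD sol i (some c)).length : Int) ∧
          (PySem.List.pySetD sol i (some c))[j.toNat]? = some none := by
        intro j hj
        obtain ⟨hj0, hjlen, hjnone⟩ := hel' j hj
        refine ⟨hj0, ?_, ?_⟩
        · rw [PySem.List.length_pySetD]; exact hjlen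
        · rw [getElem?_pySetD_ne sol i j (some c) hi0 hj0 (by rintro rfl; exact hni hj)]
          exact hjnone
      have := ih back (PySem.List.pySetD sol i (some c)) (c + 1) false hel2 hndr
        (by simp only [List.length_cons] at hlen; push_cast at hlen ⊢; omega)
      simpa using this
    | false =>
      rw [show (!false) = true from rfl, findPass_cons_skip i rest sol _ hget]
      simp only [List.cons_append]
      rw [bq_cons_false]
      have := ih (back ++ [i]) sol c true hel' hndr
        (by simp only [List.length_cons] at hlen; push_cast at hlen ⊢; omega)
      rw [show (rest ++ back) ++ [i] = rest ++ (back ++ [i]) from List.append_assoc _ _ _]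
      rw [show (!true) = false from rfl] at this
      rw [this]
      simp

theorem findLoop_zero_cards (unknown : List Int) (sol : List (Option Int)) (cards : List Int)
    (push : Bool) (hc : cards.length = 0) : findLoop unknown sol cards push = sol := by
  rw [findLoop, if_pos hc]

theorem findLoop_step (unknown : List Int) (sol : List (Option Int)) (cards : List Int)
    (push : Bool) (hc : cards.length ≠ 0) (hu : unknown ≠ []) :
    findLoop unknown sol cards push
      = findLoop (findPass unknown sol cards push).2.2.2 (findPass unknown sol cards push).1
          (findPass unknown sol cards push).2.1 (findPass unknown sol cards push).2.2.1 := by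
  rw [findLoop, if_neg hc, dif_neg hu]

theorem bq_eq_findLoop (k : Nat) (q : List Int) (sol : List (Option Int)) (c n : Int)
    (deal : Bool)
    (hk : 2 * q.length + (if deal then 0 else 1) ≤ k)
    (hel : ∀ i ∈ q, 0 ≤ i ∧ i < (sol.length : Int) ∧ sol[i.toNat]? = some none)
    (hnd : q.Nodup) (hlen : (q.length : Int) = n - c) :
    bq q sol c deal = findLoop q sol (PySem.List.pyRange c n 1) (!deal) := by
  induction k generalizing q sol c deal with
  | zero =>
    rcases eq_or_ne q [] with rfl | hq
    · simp only [List.length_nil, Nat.cast_zero] at hlen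
      rw [bq_nil, findLoop_zero_cards _ _ _ _
        (by rw [PySem.List.pyRange_one_eq_nil (by omega)]; rfl)]
    · exfalso
      have hq1 := List.length_pos_of_ne_nil hq
      have : 2 * q.length ≤ 0 := by cases deal <;> omega
      omega
  | succ k ih =>
    rcases eq_or_ne q [] with rfl | hq
    · simp only [List.length_nil, Nat.cast_zero] at hlen
      rw [bq_nil, findLoop_zero_cards _ _ _ _
        (by rw [PySem.List.pyRange_one_eq_nil (by omega)]; rfl)]
    · have hqpos := List.length_pos_of_ne_nil hq
      have hcne : (PySem.List.pyRange c n 1).length ≠ 0 := by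
        rw [PySem.List.length_pyRange_one]; omega
      obtain ⟨d, hd1, hd2, hd3, hd4, hd5, hd6, hd7⟩ :=
        findPass_spec q sol c n (!deal) hel hnd (le_of_eq hlen)
      have hpass := bq_pass q [] sol c n deal hel hnd (le_of_eq hlen)
      rw [List.append_nil] at hpass
      rw [hpass, List.nil_append, findLoop_step _ _ _ _ hcne hq]
      have hdn : (d : Int) ≤ n - c := by
        calc (d : Int) ≤ q.length := by exact_mod_cast hd1
        _ = n - c := hlen
      have hclen : ((findPass q sol (PySem.List.pyRange c n 1) (!deal)).2.1.length : Int)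
          = n - (c + d) := by
        rw [hd2, PySem.List.length_pyRange_one, Int.toNat_of_nonneg (by omega)]
      rw [show n - ((findPass q sol (PySem.List.pyRange c n 1) (!deal)).2.1.length : Int)
            = c + d by omega]
      have hmeas := findPass_measure q sol (PySem.List.pyRange c n 1) (!deal) hq
      have hb1 : (if (!deal) = true then (1:Nat) else 0) = (if deal = true then 0 else 1) := by
        cases deal <;> rfl
      have hb2 : ∀ b : Bool, (if (!b) = true then (0:Nat) else 1) = (if b = true then 1 else 0) := by
        intro b; cases b <;> rfl
      have hstep := ih (findPass q sol (PySem.List.pyRange c n 1) (!deal)).2.2.2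
        (findPass q sol (PySem.List.pyRange c n 1) (!deal)).1 (c + d)
        (!(findPass q sol (PySem.List.pyRange c n 1) (!deal)).2.2.1)
        (by rw [hb2]; rw [hb1] at hmeas; omega)
        (by
          intro j hj
          have hjq := hd5.subset hj
          obtain ⟨hj0, hjlen, _⟩ := hel j hjq
          exact ⟨hj0, by rw [hd4]; exact hjlen, hd6 j hj⟩)
        (hnd.sublist hd5)
        (by
          have : ((findPass q sol (PySem.List.pyRange c n 1) (!deal)).2.2.2.length : Int) + d
              = q.length := by exact_mod_cast congrArg (Nat.cast : Nat → Int) hd3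
          omega)
      rw [hstep, Bool.not_not, ← hd2]

-- ===== VERDICT (by name: the statement is the Claim_ definition above) =====
theorem find_spec : Claim_equal_find := by
  intro n _
  unfold Spec_find find find_alt
  rw [findAltLoop_eq_bq _ 0 _ _ _ (by omega), List.drop_zero]
  rcases le_or_gt 0 n with hn | hn
  · rw [show (false : Bool) = (!true) from rfl]
    refine (bq_eq_findLoop (2 * (PySem.List.pyRange 0 n 1).length + 1) _ _ 0 n true
      (by simp) ?_ (PySem.List.nodup_pyRange_one 0 n) ?_).symm
    · intro i hi
      obtain ⟨hi0, hin⟩ := (PySem.List.mem_pyRange_one).mp hi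
      refine ⟨hi0, ?_, ?_⟩
      · rw [List.length_replicate, Int.toNat_of_nonneg hn]; omega
      · simp only [List.getElem?_replicate]
        rw [if_pos (by omega)]
    · rw [PySem.List.length_pyRange_one, Int.sub_zero, Int.toNat_of_nonneg hn]
  · rw [PySem.List.pyRange_one_eq_nil (by omega), bq_nil,
      findLoop_zero_cards _ _ _ _ (by simp)]
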